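-- pv_equiv track=rewrite | github.com/z4tz/adventOfCode2018 | day8.py | sumMetaData2
-- ===== SOURCE A (Python) =====
-- def sumMetaData2(data):
--     def node(start):
--         nextEntry = start + 2  # read after child and metadata counts
--         childSums = []
--         for i in range(data[start]):  # step through child nodes
--             nextEntry, childSum = node(nextEntry)
--             childSums.append(childSum)
--
--         metadata = 0
--         if data[start] == 0:  # if no childnodes
--              metadata = sum(data[nextEntry:nextEntry + data[start + 1]])  # sum all metadata entries
--         else:
--             for i in data[nextEntry:nextEntry + data[start + 1]]:  # for each metadata entry
--                 try:
--                     metadata += childSums[i-1]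
--                 except IndexError:
--                     pass
--         return nextEntry + data[start + 1], metadata
--
--     return node(0)[1]
-- ===== SOURCE B (Python) =====
-- def sumMetaData2(data):
--     # B: two phases — a recursive-descent parser builds an explicit tree
--     # (header child-count, children, metadata slice), then a separate
--     # recursion evaluates node values.
--     def parse(i):
--         nc, nm = data[i], data[i + 1]
--         i += 2
--         children = []
--         for _ in range(nc):
--             child, i = parse(i)
--             children.append(child)
--         meta = data[i:i + nm]
--         return (nc, children, meta), i + nm
--
--     def value(node):
--         nc, children, meta = node
--         if nc == 0:  # a leaf's value is the sum of its metadata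
--             return sum(meta)
--         vals = [value(c) for c in children]
--         total = 0
--         for m in meta:  # metadata entries index into the children (1-based)
--             try:
--                 total += vals[m - 1]
--             except IndexError:
--                 pass
--         return total
--
--     return value(parse(0)[0])
-- ===== Notes on version B (the rewrite author's own statement) =====
-- stated objective: alternative
-- what changed: B replaces A's single interleaved recursion (which threads a running index and child sums through one pass) with a two-phase decomposition: a recursive-descent parser that builds an explicit tree of (header child-count, children, metadata) nodes, followed by a separate recursion that evaluates node values on the tree.
import Mathlib
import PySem

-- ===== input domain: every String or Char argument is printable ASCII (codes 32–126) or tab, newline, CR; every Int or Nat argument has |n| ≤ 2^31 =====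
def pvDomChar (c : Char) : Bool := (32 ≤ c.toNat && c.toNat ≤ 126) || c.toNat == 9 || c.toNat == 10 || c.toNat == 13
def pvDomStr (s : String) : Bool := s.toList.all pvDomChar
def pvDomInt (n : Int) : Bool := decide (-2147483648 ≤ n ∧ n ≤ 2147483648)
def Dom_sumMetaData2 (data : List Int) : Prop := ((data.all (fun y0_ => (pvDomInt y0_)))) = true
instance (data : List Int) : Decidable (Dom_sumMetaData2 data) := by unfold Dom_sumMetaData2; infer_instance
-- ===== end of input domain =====

-- B replaces A's single interleaved recursion (threading indices and child sums) by a
-- two-phase decomposition: parse the flat list into an explicit tree, then evaluate it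
-- in a separate recursion (objective: alternative; same asymptotic cost).

-- ===== PORT A =====
-- A's recursion is guarded by fuel (recursion depth); fuel 2*len+1 exceeds the depth of
-- every terminating run of the Python (each stack frame needs a distinct valid index).
mutual
def nodeA (data : List Int) : Nat → Int → Option (Int × Int)
  | 0, _ => none   -- fuel exhausted: only on inputs where the Python recursion diverges/raises
  | fuel+1, start =>
    match PySem.List.pyGet? data start with            -- range(data[start])
    | none => none
    | some nc =>
      match loopA data fuel nc.toNat (start + 2) [] with   -- the child loop, nextEntry = start+2
      | none => none
      | some (nextEntry, childSums) =>
        match PySem.List.pyGet? data (start + 1) with  -- data[start+1]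
        | none => none
        | some nm =>
          let metas := PySem.List.slice data (some nextEntry) (some (nextEntry + nm))
          let metadata : Int :=
            if nc = 0 then metas.sum                   -- if no childnodes
            else metas.foldl (fun acc i =>             -- for each metadata entry
              match PySem.List.pyGet? childSums (i - 1) with
              | some v => acc + v                      -- metadata += childSums[i-1]
              | none => acc) 0                         -- except IndexError: pass
          some (nextEntry + nm, metadata)
  termination_by fuel _ => (fuel, 0)
def loopA (data : List Int) : Nat → Nat → Int → List Int → Option (Int × List Int)
  | _, 0, pos, acc => some (pos, acc)
  | fuel, n+1, pos, acc =>
    match nodeA data fuel pos with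
    | none => none
    | some (pos', s) => loopA data fuel n pos' (acc ++ [s])   -- childSums.append
  termination_by fuel n _ _ => (fuel, n + 1)
end

def sumMetaData2 (data : List Int) : Int :=
  match nodeA data (2 * data.length + 1) 0 with
  | some (_, m) => m
  | none => 0      -- Python raises here; outside Pre_

-- ===== PORT B =====
-- explicit tree: (header child-count, children, metadata); mutual pair avoids a nested inductive
mutual
inductive PTree : Type
  | mk : Int → PTreeList → List Int → PTree
inductive PTreeList : Type
  | pnil : PTreeList
  | pcons : PTree → PTreeList → PTreeList
end

mutual
def parseB (data : List Int) : Nat → Int → Option (PTree × Int)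
  | 0, _ => none   -- same fuel guard as A's port
  | fuel+1, i =>
    match PySem.List.pyGet? data i, PySem.List.pyGet? data (i + 1) with   -- nc, nm = data[i], data[i+1]
    | some nc, some nm =>
      match kidsB data fuel nc.toNat (i + 2) with
      | some (cs, j) =>
        some (PTree.mk nc cs (PySem.List.slice data (some j) (some (j + nm))), j + nm)
      | none => none
    | _, _ => none
  termination_by fuel _ => (fuel, 0)
def kidsB (data : List Int) : Nat → Nat → Int → Option (PTreeList × Int)
  | _, 0, i => some (.pnil, i)
  | fuel, n+1, i =>
    match parseB data fuel i with
    | some (t, i') =>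
      match kidsB data fuel n i' with
      | some (ts, i'') => some (.pcons t ts, i'')
      | none => none
    | none => none
  termination_by fuel n _ => (fuel, n + 1)
end

mutual
def valueB : PTree → Int
  | .mk nc cs md =>
    if nc = 0 then md.sum                     -- a leaf's value is the sum of its metadata
    else
      (md.foldl (fun acc m =>
        match PySem.List.pyGet? (valsB cs) (m - 1) with   -- try: total += vals[m-1]
        | some v => acc + v
        | none => acc) 0)                       -- except IndexError: pass
def valsB : PTreeList → List Int               -- vals = [value(c) for c in children]
  | .pnil => []
  | .pcons t ts => valueB t :: valsB ts
end

def sumMetaData2_alt (data : List Int) : Int :=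
  match parseB data (2 * data.length + 1) 0 with
  | some (t, _) => valueB t
  | none => 0    -- Python raises here; outside Pre_

-- ===== PRECONDITION & SPEC =====
-- structural checker, independent of both ports: the list must start with a well-formed
-- node encoding (each node's two header reads succeed and its children parse, within the
-- recursion-depth bound of A's ports); Pre_ excludes exactly the inputs where the Python
-- A raises (IndexError on malformed/truncated data, RecursionError on cyclic encodings).
def chkKgo (step : Int → Option Int) : Nat → Int → Option Int
  | 0, i => some i
  | n+1, i =>
    match step i with
    | some i' => chkKgo step n i'
    | none => none

def chkN (data : List Int) : Nat → Int → Option Int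
  | 0, _ => none
  | fuel+1, i =>
    match PySem.List.pyGet? data i, PySem.List.pyGet? data (i + 1) with
    | some nc, some nm =>
      match chkKgo (chkN data fuel) nc.toNat (i + 2) with
      | some j => some (j + nm)
      | none => none
    | _, _ => none
  termination_by structural fuel => fuel

def Pre_sumMetaData2 (data : List Int) : Prop :=
  (chkN data (2 * data.length + 1) 0).isSome = true
instance (data : List Int) : Decidable (Pre_sumMetaData2 data) := by
  unfold Pre_sumMetaData2; infer_instance

def pvWitness_sumMetaData2 : List Int := [1, 1, 0, 2, 10, 11, 1]

def Spec_sumMetaData2 (data : List Int) (out : Int) : Prop := out = sumMetaData2_alt data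
instance (data : List Int) (out : Int) : Decidable (Spec_sumMetaData2 data out) := by unfold Spec_sumMetaData2; infer_instance

-- ===== CLAIM (what is proved, stated in full; the proofs are below) =====
def Claim_equal_sumMetaData2 : Prop := ∀ (data : List Int), Dom_sumMetaData2 data → Pre_sumMetaData2 data → Spec_sumMetaData2 data (sumMetaData2 data)

-- ===== LEMMAS AND PROOFS =====

-- simulation: wherever the checker accepts, B's parser succeeds with the same end position
-- and A's recursion returns that position together with the evaluated tree value
theorem nodeA_eq_parseB (data : List Int) : ∀ fuel, ∀ i j : Int,
    chkN data fuel i = some j →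
    ∃ t, parseB data fuel i = some (t, j) ∧ nodeA data fuel i = some (j, valueB t) := by
  intro fuel
  induction fuel with
  | zero => intro i j h; simp [chkN] at h
  | succ f IH =>
    have kids : ∀ n, ∀ i j : Int, ∀ acc : List Int,
        chkKgo (chkN data f) n i = some j →
        ∃ ts, kidsB data f n i = some (ts, j) ∧
          loopA data f n i acc = some (j, acc ++ valsB ts) := by
      intro n
      induction n with
      | zero =>
        intro i j acc h
        simp only [chkKgo] at h
        injection h with h
        subst h
        exact ⟨.pnil, by simp [kidsB], by simp [loopA, valsB]⟩
      | succ m IHm =>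
        intro i j acc h
        simp only [chkKgo] at h
        cases hc : chkN data f i with
        | none => rw [hc] at h; dsimp only at h; exact absurd h (by simp)
        | some i' =>
          rw [hc] at h; dsimp only at h
          obtain ⟨t, hpt, hnt⟩ := IH i i' hc
          obtain ⟨ts, hk, hl⟩ := IHm i' j (acc ++ [valueB t]) h
          refine ⟨.pcons t ts, ?_, ?_⟩
          · simp only [kidsB, hpt, hk]
          · simp only [loopA, hnt, hl, valsB]
            simp [List.append_assoc]
    intro i j h
    simp only [chkN] at h
    cases h1 : PySem.List.pyGet? data i with
    | none => rw [h1] at h; dsimp only at h; exact absurd h (by simp)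
    | some nc =>
      cases h2 : PySem.List.pyGet? data (i + 1) with
      | none => rw [h1, h2] at h; dsimp only at h; exact absurd h (by simp)
      | some nm =>
        rw [h1, h2] at h; dsimp only at h
        cases h3 : chkKgo (chkN data f) nc.toNat (i + 2) with
        | none => rw [h3] at h; dsimp only at h; exact absurd h (by simp)
        | some j0 =>
          rw [h3] at h; dsimp only at h
          injection h with h
          obtain ⟨ts, hk, hl⟩ := kids nc.toNat (i + 2) j0 [] h3
          refine ⟨PTree.mk nc ts (PySem.List.slice data (some j0) (some (j0 + nm))), ?_, ?_⟩
          · simp only [parseB, h1, h2, hk, h]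
          · simp only [nodeA, h1, h2, hl, List.nil_append, valueB, h]

-- ===== VERDICT (by name: the statement is the Claim_ definition above) =====
theorem sumMetaData2_spec : Claim_equal_sumMetaData2 := by
  intro data _ hpre
  unfold Spec_sumMetaData2 sumMetaData2 sumMetaData2_alt
  unfold Pre_sumMetaData2 at hpre
  cases hch : chkN data (2 * data.length + 1) 0 with
  | none => rw [hch] at hpre; simp at hpre
  | some j =>
    obtain ⟨t, hp, hn⟩ := nodeA_eq_parseB data (2 * data.length + 1) 0 j hch
    rw [hp, hn]
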